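-- pv_equiv track=rewrite | github.com/WaldNimrod/TikTrack | Backend/routes/api/js_map.py | sort_js_files_by_generality
-- ===== SOURCE A (Python) =====
-- def sort_js_files_by_generality(js_files):
--     """
--     Sort JS files by generality (most general first)
--     """
--     generality_order = [
--         # Most general files first
--         'main.js', 'header-system.js', 'simple-filter.js', 'ui-utils.js',
--         'translation-utils.js', 'data-utils.js', 'table-mappings.js',
--         'date-utils.js', 'tables.js', 'linked-items.js', 'page-utils.js',
--         'filter-system.js', 'console-cleanup.js',
--         # Specific page files
--         'alerts.js', 'active-alerts-component.js', 'trades.js', 'trade_plans.js',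
--         'research.js', 'executions.js', 'tickers.js', 'ticker-service.js',
--         'accounts.js', 'cash_flows.js', 'notes.js', 'preferences.js',
--         'database.js', 'db-extradata.js', 'constraint-manager.js',
--         'currencies.js', 'auth.js'
--     ]
--
--     # Sort files according to generality order
--     sorted_files = []
--     for file in generality_order:
--         if file in js_files:
--             sorted_files.append(file)
--
--     # Add any remaining files
--     for file in js_files:
--         if file not in sorted_files:
--             sorted_files.append(file)
--
--     return sorted_files
-- ===== SOURCE B (Python) =====
-- def sort_js_files_by_generality(js_files):
--     """
--     Sort JS files by generality (most general first)
--     """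
--     generality_order = [
--         # Most general files first
--         'main.js', 'header-system.js', 'simple-filter.js', 'ui-utils.js',
--         'translation-utils.js', 'data-utils.js', 'table-mappings.js',
--         'date-utils.js', 'tables.js', 'linked-items.js', 'page-utils.js',
--         'filter-system.js', 'console-cleanup.js',
--         # Specific page files
--         'alerts.js', 'active-alerts-component.js', 'trades.js', 'trade_plans.js',
--         'research.js', 'executions.js', 'tickers.js', 'ticker-service.js',
--         'accounts.js', 'cash_flows.js', 'notes.js', 'preferences.js',
--         'database.js', 'db-extradata.js', 'constraint-manager.js',
--         'currencies.js', 'auth.js'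
--     ]
--     # Rank table + dedup + one stable sort: known names get their priority index,
--     # unknown names share rank len(order) and keep first-occurrence order by stability.
--     rank = {name: i for i, name in enumerate(generality_order)}
--     unique = list(dict.fromkeys(js_files))
--     return sorted(unique, key=lambda f: rank.get(f, len(generality_order)))
-- ===== Notes on version B (the rewrite author's own statement) =====
-- stated objective: faster
-- what changed: Replaces A's two membership-scan loops (each priority name scanned in js_files, each file scanned in the growing output) by a rank dictionary built from enumerate, an ordered dedup via dict.fromkeys, and one stable sort keyed by rank.get(f, len(order)), relying on stability for unknown files.
import Mathlib
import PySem

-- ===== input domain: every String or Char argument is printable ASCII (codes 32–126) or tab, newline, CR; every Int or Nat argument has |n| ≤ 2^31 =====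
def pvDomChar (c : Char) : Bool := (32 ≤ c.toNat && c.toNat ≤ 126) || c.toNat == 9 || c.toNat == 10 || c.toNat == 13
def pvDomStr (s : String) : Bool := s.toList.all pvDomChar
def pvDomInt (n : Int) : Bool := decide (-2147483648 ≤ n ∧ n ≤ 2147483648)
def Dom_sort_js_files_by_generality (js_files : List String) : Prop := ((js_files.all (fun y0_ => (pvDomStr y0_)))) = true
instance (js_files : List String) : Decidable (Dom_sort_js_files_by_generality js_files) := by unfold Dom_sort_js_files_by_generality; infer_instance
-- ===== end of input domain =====

-- B replaces A's two membership-scan loops by a rank table, ordered dedup and one stable sort.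

-- the fixed priority list both programs hard-code
def pvGeneralityOrder : List String :=
  ["main.js", "header-system.js", "simple-filter.js", "ui-utils.js",
   "translation-utils.js", "data-utils.js", "table-mappings.js",
   "date-utils.js", "tables.js", "linked-items.js", "page-utils.js",
   "filter-system.js", "console-cleanup.js",
   "alerts.js", "active-alerts-component.js", "trades.js", "trade_plans.js",
   "research.js", "executions.js", "tickers.js", "ticker-service.js",
   "accounts.js", "cash_flows.js", "notes.js", "preferences.js",
   "database.js", "db-extradata.js", "constraint-manager.js",
   "currencies.js", "auth.js"]

-- ===== PORT A =====
def sort_js_files_by_generality (js_files : List String) : List String :=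
  -- for file in generality_order: if file in js_files: sorted_files.append(file)
  let sorted_files :=
    pvGeneralityOrder.foldl
      (fun acc file => if js_files.contains file then acc ++ [file] else acc) []
  -- for file in js_files: if file not in sorted_files: sorted_files.append(file)
  js_files.foldl
    (fun acc file => if acc.contains file then acc else acc ++ [file]) sorted_files

-- ===== PORT B =====
def sort_js_files_by_generality_alt (js_files : List String) : List String :=
  -- rank = {name: i for i, name in enumerate(generality_order)}
  let rank : PySem.Dict String Int :=
    (PySem.List.enumerate pvGeneralityOrder).foldl
      (fun d p => d.insert p.2 p.1) PySem.Dict.empty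
  -- unique = list(dict.fromkeys(js_files))
  let unique := PySem.List.dedup js_files
  -- sorted(unique, key=lambda f: rank.get(f, len(generality_order)))
  PySem.List.sorted unique (fun f => rank.getD f (pvGeneralityOrder.length : Int))

-- ===== PRECONDITION & SPEC =====
def Spec_sort_js_files_by_generality (js_files : List String) (out : List String) : Prop := out = sort_js_files_by_generality_alt js_files
instance (js_files : List String) (out : List String) : Decidable (Spec_sort_js_files_by_generality js_files out) := by unfold Spec_sort_js_files_by_generality; infer_instance

-- ===== CLAIM (what is proved, stated in full; the proofs are below) =====
def Claim_equal_sort_js_files_by_generality : Prop := ∀ (js_files : List String), Dom_sort_js_files_by_generality js_files → Spec_sort_js_files_by_generality js_files (sort_js_files_by_generality js_files)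

-- ===== LEMMAS AND PROOFS =====

-- B's sort key, named for the proofs
def pvRank : PySem.Dict String Int :=
  (PySem.List.enumerate pvGeneralityOrder).foldl
    (fun d p => d.insert p.2 p.1) PySem.Dict.empty

def pvKey (f : String) : Int := pvRank.getD f (pvGeneralityOrder.length : Int)

-- the enumerate-fold dict maps each name of a nodup list to start + its index
lemma pvRank_fold_getD (os : List String) : ∀ (s : Int) (d0 : PySem.Dict String Int)
    (f : String) (v : Int), os.Nodup →
    ((PySem.List.enumerate os s).foldl (fun d p => d.insert p.2 p.1) d0).getD f v
      = if f ∈ os then s + (os.idxOf f : Int) else d0.getD f v := by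
  induction os with
  | nil => intro s d0 f v _; simp [PySem.List.enumerate]
  | cons x t ih =>
    intro s d0 f v hnd
    rcases List.nodup_cons.mp hnd with ⟨hx, hndt⟩
    simp only [PySem.List.enumerate, List.foldl_cons]
    rw [ih (s + 1) (d0.insert x s) f v hndt]
    by_cases hft : f ∈ t
    · have hfx : f ≠ x := fun h => hx (h ▸ hft)
      rw [if_pos hft, if_pos (List.mem_cons.mpr (Or.inr hft)),
        List.idxOf_cons_ne _ (Ne.symm hfx)]
      push_cast
      ring
    · rw [if_neg hft, PySem.Dict.getD_insert]
      by_cases hfx : f = x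
      · subst hfx
        rw [if_pos rfl, if_pos (List.mem_cons.mpr (Or.inl rfl)), List.idxOf_cons_self]
        simp
      · rw [if_neg hfx, if_neg (by simp [hfx, hft])]

lemma pvOrder_nodup : pvGeneralityOrder.Nodup := by decide

lemma pvKey_eq (f : String) :
    pvKey f = if f ∈ pvGeneralityOrder then (pvGeneralityOrder.idxOf f : Int)
              else (pvGeneralityOrder.length : Int) := by
  unfold pvKey pvRank
  rw [pvRank_fold_getD pvGeneralityOrder 0 PySem.Dict.empty f _ pvOrder_nodup]
  split_ifs with h
  · simp
  · simp [PySem.Dict.getD, PySem.Dict.get?, PySem.Dict.empty]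

lemma pvKey_lt_iff (f : String) :
    pvKey f < (pvGeneralityOrder.length : Int) ↔ f ∈ pvGeneralityOrder := by
  rw [pvKey_eq]
  split_ifs with h
  · simp only [h, iff_true]
    exact_mod_cast List.idxOf_lt_length_of_mem h
  · simp [h]

lemma pvKey_le (f : String) : pvKey f ≤ (pvGeneralityOrder.length : Int) := by
  rw [pvKey_eq]
  split_ifs with h
  · exact le_of_lt (by exact_mod_cast List.idxOf_lt_length_of_mem h)
  · exact le_refl _

-- a nodup list is pairwise strictly increasing in idxOf
lemma pvPairwise_idxOf (l : List String) (h : l.Nodup) :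
    l.Pairwise (fun a b => l.idxOf a < l.idxOf b) := by
  induction l with
  | nil => exact List.Pairwise.nil
  | cons x t ih =>
    rcases List.nodup_cons.mp h with ⟨hx, hndt⟩
    refine List.pairwise_cons.mpr ⟨?_, ?_⟩
    · intro b hb
      have hbx : b ≠ x := fun hbx => hx (hbx ▸ hb)
      rw [List.idxOf_cons_self, List.idxOf_cons_ne _ (Ne.symm hbx)]
      exact Nat.succ_pos _
    · refine (ih hndt).imp_of_mem ?_
      intro a b ha hb hab
      have hax : a ≠ x := fun h' => hx (h' ▸ ha)
      have hbx : b ≠ x := fun h' => hx (h' ▸ hb)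
      rw [List.idxOf_cons_ne _ (Ne.symm hax), List.idxOf_cons_ne _ (Ne.symm hbx)]
      exact Nat.succ_lt_succ hab

-- inserting below a tail of strictly larger keys happens in the prefix
lemma pvInsertBy_append (bf : String → String → Bool) (x : String) :
    ∀ (L H : List String), (∀ y ∈ H, bf x y = true) →
    PySem.List.insertBy bf x (L ++ H) = PySem.List.insertBy bf x L ++ H := by
  intro L H hH
  induction L with
  | nil =>
    cases H with
    | nil => simp
    | cons h t =>
      simp only [List.nil_append, PySem.List.insertBy, hH h (by simp)]
      simp
  | cons y L ih =>
    simp only [List.cons_append, PySem.List.insertBy]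
    by_cases hy : bf x y = true
    · simp [hy]
    · simp only [Bool.not_eq_true] at hy
      simp [hy, ih]

-- stable sort with a capped key splits into sorted low part ++ high part in input order
lemma pvSorted_split (key : String → Int) (B : Int) :
    ∀ (xs : List String), (∀ x ∈ xs, key x ≤ B) →
    PySem.List.sorted xs key
      = PySem.List.sorted (xs.filter (fun x => decide (key x < B))) key
        ++ xs.filter (fun x => !decide (key x < B)) := by
  intro xs
  induction xs using List.reverseRecOn with
  | nil => intro _; simp [PySem.List.sorted]
  | append_singleton xs x ih =>
    intro hle
    have hle' : ∀ y ∈ xs, key y ≤ B := fun y hy => hle y (by simp [hy])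
    rw [PySem.List.sorted_eq_foldl_insertBy, List.foldl_append,
      ← PySem.List.sorted_eq_foldl_insertBy, ih hle', List.filter_append,
      List.filter_append]
    simp only [List.foldl_cons, List.foldl_nil]
    by_cases hx : key x < B
    · -- low element: inserted into the sorted low prefix, the high tail is untouched
      rw [pvInsertBy_append _ x _ _ ?_]
      · have : PySem.List.insertBy (fun a b => decide (key a < key b)) x
            (PySem.List.sorted (xs.filter (fun y => decide (key y < B))) key)
            = PySem.List.sorted (xs.filter (fun y => decide (key y < B)) ++ [x]) key := by
          rw [PySem.List.sorted_eq_foldl_insertBy, PySem.List.sorted_eq_foldl_insertBy,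
            List.foldl_append]
          simp
        rw [this]
        simp [hx]
      · intro y hy
        have hyB : key y ≤ B := hle' y (List.mem_filter.mp hy).1
        have : ¬ key y < B := by
          have := (List.mem_filter.mp hy).2
          simpa using this
        have hyx : key x < key y := lt_of_lt_of_le hx (le_of_not_gt this)
        simpa using hyx
    · -- high element: appended at the very end
      rw [PySem.List.insertBy_of_forall_not_before _ _ _ ?_]
      · simp [hx, List.append_assoc]
      · intro y hy
        have hyxs : y ∈ xs := by
          rcases List.mem_append.mp hy with h | h
          · exact (List.mem_filter.mp ((PySem.List.mem_sorted _ _ _ _).mp h)).1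
          · exact (List.mem_filter.mp h).1
        have : ¬ key x < key y := not_lt_of_ge (le_trans (hle' y hyxs) (le_of_not_gt hx))
        simpa using this

-- A's second loop in parallel with the dedup fold
def pvStepA (acc : List String) (file : String) : List String :=
  if acc.contains file then acc else acc ++ [file]

def pvNp (x : String) : Bool := !pvGeneralityOrder.contains x

lemma pvLoopA (K : List String)
    (hK : ∀ f ∈ K, f ∈ pvGeneralityOrder) :
    ∀ (rest : List String) (s : List String),
    (∀ f ∈ rest, f ∈ pvGeneralityOrder → f ∈ K) →
    rest.foldl pvStepA (K ++ s.filter pvNp)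
      = K ++ (rest.foldl PySem.Set.add s).filter pvNp := by
  intro rest
  induction rest with
  | nil => intro s _; simp
  | cons x t ih =>
    intro s hrest
    simp only [List.foldl_cons]
    by_cases hord : x ∈ pvGeneralityOrder
    · have hxK : x ∈ K := hrest x (by simp) hord
      have hA : pvStepA (K ++ s.filter pvNp) x = K ++ s.filter pvNp := by
        unfold pvStepA
        rw [if_pos (List.contains_iff_mem.mpr (List.mem_append.mpr (Or.inl hxK)))]
      have hS : (PySem.Set.add s x).filter pvNp = s.filter pvNp := by
        unfold PySem.Set.add
        split_ifs with h
        · rfl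
        · rw [List.filter_append]
          have hnpx : pvNp x = false := by simp [pvNp]; exact hord
          simp [hnpx]
      rw [hA, ← hS, ih (PySem.Set.add s x) (fun f hf => hrest f (by simp [hf]))]
    · have hxK : x ∉ K := fun h => hord (hK x h)
      have hnp : pvNp x = true := by
        simp only [pvNp, Bool.not_eq_true']
        exact Bool.eq_false_iff.mpr (fun h => hord (List.contains_iff_mem.mp h))
      by_cases hs : PySem.Set.contains s x = true
      · have hA : pvStepA (K ++ s.filter pvNp) x = K ++ s.filter pvNp := by
          unfold pvStepA
          rw [if_pos (List.contains_iff_mem.mpr (List.mem_append.mpr (Or.inr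
            (List.mem_filter.mpr ⟨(PySem.Set.contains_iff s x).mp hs, hnp⟩))))]
        have hS : PySem.Set.add s x = s := by unfold PySem.Set.add; rw [if_pos hs]
        rw [hA, hS, ih s (fun f hf => hrest f (by simp [hf]))]
      · have hA : pvStepA (K ++ s.filter pvNp) x = K ++ (s.filter pvNp ++ [x]) := by
          unfold pvStepA
          rw [if_neg, List.append_assoc]
          intro h
          rcases List.mem_append.mp (List.contains_iff_mem.mp h) with h' | h'
          · exact hxK h'
          · exact hs ((PySem.Set.contains_iff s x).mpr (List.mem_filter.mp h').1)
        have hS : (PySem.Set.add s x).filter pvNp = s.filter pvNp ++ [x] := by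
          unfold PySem.Set.add
          rw [if_neg hs, List.filter_append]
          simp [List.filter, hnp]
        rw [hA, ← hS, ih (PySem.Set.add s x) (fun f hf => hrest f (by simp [hf]))]

-- ===== VERDICT (by name: the statement is the Claim_ definition above) =====
theorem sort_js_files_by_generality_spec : Claim_equal_sort_js_files_by_generality := by
  intro js_files _
  unfold Spec_sort_js_files_by_generality
  unfold sort_js_files_by_generality sort_js_files_by_generality_alt
  simp only
  rw [PySem.List.foldl_append_if_eq_filter, List.nil_append]
  set K := pvGeneralityOrder.filter (fun file => js_files.contains file) with hKdef
  have hKmem : ∀ f ∈ K, f ∈ pvGeneralityOrder := fun f hf => (List.mem_filter.mp hf).1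
  -- A's value
  have hfun : (fun acc file => if acc.contains file then acc else acc ++ [file]) = pvStepA := rfl
  have hA : js_files.foldl pvStepA K
      = K ++ (PySem.List.dedup js_files).filter pvNp := by
    have := pvLoopA K hKmem js_files []
      (fun f hf hord => List.mem_filter.mpr ⟨hord, List.contains_iff_mem.mpr hf⟩)
    simpa [PySem.List.dedup, PySem.Set.ofList, PySem.Set.empty] using this
  -- B's value
  have hrank : (fun f => ((PySem.List.enumerate pvGeneralityOrder).foldl
      (fun d p => d.insert p.2 p.1) PySem.Dict.empty).getD f (pvGeneralityOrder.length : Int))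
      = pvKey := rfl
  set u := PySem.List.dedup js_files with hudef
  have hu_nodup : u.Nodup := PySem.Set.nodup_ofList js_files
  have hu_mem : ∀ f, f ∈ u ↔ f ∈ js_files := fun f => PySem.Set.mem_ofList js_files f
  have hsplit := pvSorted_split pvKey (pvGeneralityOrder.length : Int) u
    (fun x _ => pvKey_le x)
  -- the two filters of u coincide with membership in the order
  have hlow : ∀ x, (decide (pvKey x < (pvGeneralityOrder.length : Int)))
      = pvGeneralityOrder.contains x := by
    intro x
    rw [Bool.eq_iff_iff, decide_eq_true_iff, List.contains_iff_mem]
    exact pvKey_lt_iff x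
  have hlowf : (fun x => decide (pvKey x < (pvGeneralityOrder.length : Int))) =
      (fun x => pvGeneralityOrder.contains x) := funext hlow
  have hhighf : (fun x => !decide (pvKey x < (pvGeneralityOrder.length : Int))) = pvNp := by
    funext x; rw [hlow x]; rfl
  rw [hfun, hA, hrank, hsplit, hlowf, hhighf]
  congr 1
  -- sorted low part = K : permutation + strictly increasing keys
  refine (PySem.List.sorted_eq_of_perm_of_pairwise_lt _ K pvKey ?_ ?_).symm
  · rw [List.perm_ext_iff_of_nodup (hKdef ▸ pvOrder_nodup.filter _) (hu_nodup.filter _)]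
    intro a
    simp only [hKdef, List.mem_filter, List.contains_iff_mem, hu_mem]
    tauto
  · refine ((pvPairwise_idxOf pvGeneralityOrder pvOrder_nodup).filter _).imp_of_mem ?_
    intro a b ha hb hab
    have hao : a ∈ pvGeneralityOrder := (List.mem_filter.mp ha).1
    have hbo : b ∈ pvGeneralityOrder := (List.mem_filter.mp hb).1
    rw [pvKey_eq a, pvKey_eq b, if_pos hao, if_pos hbo]
    exact_mod_cast hab
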